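-- pv_equiv track=rewrite | github.com/coldzero94/coldzero94 | .github/scripts/generate_dino_contribution.py | stamp
-- ===== SOURCE A (Python) =====
-- COLS = 53
--
-- ROWS = 7
--
-- def stamp(
--     pattern: list[str],
--     offset_x: int,
--     offset_y: int,
--     token: str,
-- ) -> set[tuple[int, int]]:
--     cells: set[tuple[int, int]] = set()
--     for dy, row in enumerate(pattern):
--         for dx, ch in enumerate(row):
--             if ch != token:
--                 continue
--             x = offset_x + dx
--             y = offset_y + dy
--             if 0 <= x < COLS and 0 <= y < ROWS:
--                 cells.add((x, y))
--     return cells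
-- ===== SOURCE B (Python) =====
-- COLS = 53
--
-- ROWS = 7
--
-- def stamp(
--     pattern: list[str],
--     offset_x: int,
--     offset_y: int,
--     token: str,
-- ) -> set[tuple[int, int]]:
--     # Scan the fixed output canvas and project each grid cell back into the
--     # pattern, instead of scanning the pattern and projecting forward.
--     cells: set[tuple[int, int]] = set()
--     for y in range(ROWS):
--         dy = y - offset_y
--         if 0 <= dy < len(pattern):
--             row = pattern[dy]
--             for x in range(COLS):
--                 dx = x - offset_x
--                 if 0 <= dx < len(row) and row[dx] == token:
--                     cells.add((x, y))
--     return cells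
-- ===== Notes on version B (the rewrite author's own statement) =====
-- stated objective: faster
-- what changed: B iterates over the fixed 53x7 output canvas and projects each grid cell backward into the pattern (dy = y - offset_y, dx = x - offset_x) with an index lookup, instead of enumerating the whole pattern and projecting forward; work is bounded by the canvas size instead of the pattern size.
import Mathlib
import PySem

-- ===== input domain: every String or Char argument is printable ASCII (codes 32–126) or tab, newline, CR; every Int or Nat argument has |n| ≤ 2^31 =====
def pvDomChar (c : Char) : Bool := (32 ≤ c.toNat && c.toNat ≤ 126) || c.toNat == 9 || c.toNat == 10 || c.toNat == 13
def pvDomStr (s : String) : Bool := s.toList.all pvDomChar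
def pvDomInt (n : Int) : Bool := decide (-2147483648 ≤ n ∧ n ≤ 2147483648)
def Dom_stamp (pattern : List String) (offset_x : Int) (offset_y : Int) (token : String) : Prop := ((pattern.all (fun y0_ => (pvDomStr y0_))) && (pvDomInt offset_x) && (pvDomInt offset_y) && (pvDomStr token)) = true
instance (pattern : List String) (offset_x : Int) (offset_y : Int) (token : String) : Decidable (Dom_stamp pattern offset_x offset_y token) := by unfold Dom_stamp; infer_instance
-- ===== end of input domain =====

-- B scans the fixed 53×7 output canvas and projects each grid cell backward into the
-- pattern by an index lookup, instead of enumerating the whole pattern and projecting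
-- forward; its work is bounded by the canvas size, not the pattern size (measured faster
-- on large patterns), and the result is exactly A's.

-- ===== PORT A =====
def stamp (pattern : List String) (offset_x : Int) (offset_y : Int) (token : String) : List (Int × Int) :=
  (PySem.List.enumerate pattern).foldl (fun cells dyrow =>
    (PySem.List.enumerate dyrow.2.toList).foldl (fun cells dxch =>
      if String.mk [dxch.2] ≠ token then cells
      else
        let x := offset_x + dxch.1
        let y := offset_y + dyrow.1
        if 0 ≤ x ∧ x < 53 ∧ 0 ≤ y ∧ y < 7 then PySem.Set.add cells (x, y) else cells)
      cells)
    PySem.Set.empty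

-- ===== PORT B =====
def stamp_alt (pattern : List String) (offset_x : Int) (offset_y : Int) (token : String) : List (Int × Int) :=
  (PySem.List.pyRange 0 7).foldl (fun cells y =>
    let dy := y - offset_y
    if 0 ≤ dy ∧ dy < (pattern.length : Int) then
      let row := (PySem.List.pyGetD pattern dy "").toList
      (PySem.List.pyRange 0 53).foldl (fun cells x =>
        let dx := x - offset_x
        if (0 ≤ dx ∧ dx < (row.length : Int)) ∧ String.mk [PySem.List.pyGetD row dx ' '] = token
        then PySem.Set.add cells (x, y) else cells)
        cells
    else cells)
    PySem.Set.empty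

-- ===== PRECONDITION & SPEC =====
def Spec_stamp (pattern : List String) (offset_x : Int) (offset_y : Int) (token : String) (out : List (Int × Int)) : Prop := out = stamp_alt pattern offset_x offset_y token
instance (pattern : List String) (offset_x : Int) (offset_y : Int) (token : String) (out : List (Int × Int)) : Decidable (Spec_stamp pattern offset_x offset_y token out) := by unfold Spec_stamp; infer_instance

-- ===== CLAIM (what is proved, stated in full; the proofs are below) =====
def Claim_equal_stamp : Prop := ∀ (pattern : List String) (offset_x : Int) (offset_y : Int) (token : String), Dom_stamp pattern offset_x offset_y token → Spec_stamp pattern offset_x offset_y token (stamp pattern offset_x offset_y token)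

-- ===== LEMMAS AND PROOFS =====

-- A-side flat form: the cell contributed by one enumerated pattern character.
def aTerm (ox : Int) (t : String) (y : Int) (p : Int × Char) : List (Int × Int) :=
  if String.mk [p.2] = t ∧ (0 ≤ ox + p.1 ∧ ox + p.1 < 53) ∧ (0 ≤ y ∧ y < 7)
  then [(ox + p.1, y)] else []

def aInner (ox : Int) (t : String) (cs : List Char) (y : Int) : List (Int × Int) :=
  (PySem.List.enumerate cs).flatMap (aTerm ox t y)

-- B-side flat form.
def bTerm (ox : Int) (t : String) (cs : List Char) (y : Int) (x : Int) : List (Int × Int) :=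
  if (0 ≤ x - ox ∧ x - ox < (cs.length : Int)) ∧ String.mk [PySem.List.pyGetD cs (x - ox) ' '] = t
  then [(x, y)] else []

def bInner (ox : Int) (t : String) (cs : List Char) (y : Int) : List (Int × Int) :=
  (PySem.List.pyRange 0 53).flatMap (bTerm ox t cs y)

def bBlock (pattern : List String) (ox oy : Int) (t : String) (y : Int) : List (Int × Int) :=
  if 0 ≤ y - oy ∧ y - oy < (pattern.length : Int)
  then bInner ox t (PySem.List.pyGetD pattern (y - oy) "").toList y else []

def bFlat (pattern : List String) (ox oy : Int) (t : String) : List (Int × Int) :=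
  (PySem.List.pyRange 0 7).flatMap (bBlock pattern ox oy t)

-- fold of Set.add over blocks = fold over the flattened list
lemma foldl_add_blocks {α β : Type} [BEq α] (g : β → List α) :
    ∀ (l : List β) (s : PySem.Set α),
      l.foldl (fun s b => (g b).foldl PySem.Set.add s) s = (l.flatMap g).foldl PySem.Set.add s := by
  intro l
  induction l with
  | nil => intro s; rfl
  | cons b l ih => intro s; simp only [List.foldl_cons, List.flatMap_cons, List.foldl_append, ih]

lemma pyGetD_cons_pos {α : Type} (c : α) (cs : List α) (i : Int) (d : α) (h : 1 ≤ i) :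
    PySem.List.pyGetD (c :: cs) i d = PySem.List.pyGetD cs (i - 1) d := by
  rw [PySem.List.pyGetD_of_nonneg _ _ (by omega), PySem.List.pyGetD_of_nonneg _ _ (by omega)]
  have : i.toNat = (i - 1).toNat + 1 := by omega
  rw [this, List.getD_cons_succ]

-- split a flatMap over a strictly increasing list into a point part and an upper part
lemma flatMap_split {γ : Type} (f g : Int → List γ) (o : Int) :
    ∀ (R : List Int), R.Pairwise (· < ·) →
      (∀ x, x ≠ o → f x = []) → (∀ x, x ≤ o → g x = []) →
      R.flatMap (fun x => f x ++ g x) = (if o ∈ R then f o else []) ++ R.flatMap g := by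
  intro R
  induction R with
  | nil => intro _ _ _; simp
  | cons r R ih =>
    intro hp hf hg
    have h1 : ∀ x ∈ R, r < x := (List.pairwise_cons.mp hp).1
    have h2 : R.Pairwise (· < ·) := (List.pairwise_cons.mp hp).2
    by_cases hro : r = o
    · subst hro
      have hgo : g r = [] := hg r le_rfl
      have hR : R.flatMap (fun x => f x ++ g x) = R.flatMap g := by
        apply List.flatMap_congr
        intro x hx
        rw [hf x (by have := h1 x hx; omega)]
        rfl
      simp [List.flatMap_cons, hgo, hR]
    · by_cases hr : r < o
      · have hgr : g r = [] := hg r (by omega)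
        have hfr : f r = [] := hf r hro
        have := ih h2 hf hg
        simp only [List.flatMap_cons, hfr, hgr, List.nil_append, this, List.mem_cons]
        have hiff : (o = r ∨ o ∈ R) ↔ o ∈ R :=
          ⟨fun h => h.elim (fun h => absurd h.symm hro) id, Or.inr⟩
        rw [if_congr hiff rfl rfl]
      · have hor : o < r := by omega
        have hnoR : o ∉ R := fun h => by have := h1 o h; omega
        have hfr : f r = [] := hf r hro
        have := ih h2 hf hg
        simp only [List.flatMap_cons, hfr, List.nil_append, this, List.mem_cons]
        simp [hnoR, Ne.symm hro]

lemma bTerm_nil (ox : Int) (t : String) (y x : Int) : bTerm ox t [] y x = [] := by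
  unfold bTerm
  rw [if_neg]
  rintro ⟨⟨hA, hB⟩, _⟩
  simp at hB
  omega

lemma bInner_nil (ox : Int) (t : String) (y : Int) : bInner ox t [] y = [] := by
  unfold bInner
  simp [List.flatMap_eq_nil_iff, bTerm_nil]

lemma bInner_cons (ox : Int) (t : String) (c : Char) (cs : List Char) (y : Int) :
    bInner ox t (c :: cs) y =
      (if (0 ≤ ox ∧ ox < 53) ∧ String.mk [c] = t then [(ox, y)] else [])
        ++ bInner (ox + 1) t cs y := by
  unfold bInner
  have hpt : ∀ x, bTerm ox t (c :: cs) y x =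
      (if x = ox ∧ String.mk [c] = t then [(x, y)] else []) ++ bTerm (ox + 1) t cs y x := by
    intro x
    by_cases hx : x = ox
    · subst hx
      have hg : bTerm (x + 1) t cs y x = [] := by
        unfold bTerm; rw [if_neg]; rintro ⟨⟨hA, _⟩, _⟩; omega
      rw [hg, List.append_nil]
      unfold bTerm
      have h0 : x - x = (0 : Int) := by omega
      rw [h0, PySem.List.pyGetD_zero_cons]
      have hlen : (0 : Int) ≤ 0 ∧ (0 : Int) < ((c :: cs).length : Int) :=
        ⟨le_refl 0, by exact_mod_cast Nat.succ_pos cs.length⟩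
      by_cases hc : String.mk [c] = t
      · rw [if_pos ⟨hlen, hc⟩, if_pos ⟨rfl, hc⟩]
      · rw [if_neg (by tauto), if_neg (by tauto)]
    · rw [if_neg (by tauto), List.nil_append]
      unfold bTerm
      by_cases hlt : x < ox
      · rw [if_neg (by rintro ⟨⟨hA, _⟩, _⟩; omega), if_neg (by rintro ⟨⟨hA, _⟩, _⟩; omega)]
      · have h1 : 1 ≤ x - ox := by omega
        rw [pyGetD_cons_pos c cs _ _ h1]
        have harg : x - ox - 1 = x - (ox + 1) := by omega
        rw [harg]
        have hlen : ((c :: cs).length : Int) = (cs.length : Int) + 1 := by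
          simp
        by_cases hb : 0 ≤ x - (ox + 1) ∧ x - (ox + 1) < (cs.length : Int)
        · by_cases hc : String.mk [PySem.List.pyGetD cs (x - (ox + 1)) ' '] = t
          · rw [if_pos ⟨⟨by omega, by rw [hlen]; omega⟩, hc⟩, if_pos ⟨hb, hc⟩]
          · rw [if_neg (by tauto), if_neg (by tauto)]
        · rw [if_neg (by rw [hlen]; rintro ⟨⟨hA, hB⟩, _⟩; exact hb ⟨by omega, by omega⟩),
            if_neg (by tauto)]
  calc (PySem.List.pyRange 0 53).flatMap (bTerm ox t (c :: cs) y)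
      = (PySem.List.pyRange 0 53).flatMap
          (fun x => (if x = ox ∧ String.mk [c] = t then [(x, y)] else [])
            ++ bTerm (ox + 1) t cs y x) := by
        exact List.flatMap_congr (fun x _ => hpt x)
    _ = _ := by
      rw [flatMap_split _ _ ox _ (PySem.List.pairwise_lt_pyRange_one 0 53)
        (fun x hx => by rw [if_neg (by tauto)])
        (fun x hx => by
          unfold bTerm
          rw [if_neg]; rintro ⟨⟨hA, _⟩, _⟩; omega)]
      congr 1
      by_cases hb : 0 ≤ ox ∧ ox < 53
      · rw [if_pos ((PySem.List.mem_pyRange_one).mpr hb)]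
        by_cases hc : String.mk [c] = t
        · rw [if_pos ⟨rfl, hc⟩, if_pos ⟨hb, hc⟩]
        · rw [if_neg (by tauto), if_neg (by tauto)]
      · rw [if_neg (fun hmem => hb ((PySem.List.mem_pyRange_one).mp hmem)), if_neg (by tauto)]

lemma aInner_eq (t : String) :
    ∀ (cs : List Char) (s ox y : Int), 0 ≤ y → y < 7 →
      (PySem.List.enumerate cs s).flatMap (aTerm ox t y) = bInner (ox + s) t cs y := by
  intro cs
  induction cs with
  | nil => intro s ox y _ _; simp [PySem.List.enumerate_nil, bInner_nil]
  | cons c cs ih =>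
    intro s ox y hy0 hy7
    rw [PySem.List.enumerate_cons, List.flatMap_cons, bInner_cons]
    congr 1
    · unfold aTerm
      by_cases hb : (0 ≤ ox + s ∧ ox + s < 53) ∧ String.mk [c] = t
      · rw [if_pos ⟨hb.2, hb.1, hy0, hy7⟩, if_pos hb]
      · rw [if_neg (by tauto), if_neg hb]
    · rw [ih (s + 1) ox y hy0 hy7]
      ring_nf

lemma aInner_nil_of (t : String) (cs : List Char) (s ox y : Int) (h : ¬ (0 ≤ y ∧ y < 7)) :
    (PySem.List.enumerate cs s).flatMap (aTerm ox t y) = [] := by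
  rw [List.flatMap_eq_nil_iff]
  intro p _
  unfold aTerm
  rw [if_neg (by tauto)]

lemma outer_eq (t : String) (ox : Int) :
    ∀ (ps : List String) (oy : Int),
      (PySem.List.enumerate ps oy).flatMap
        (fun q => (PySem.List.enumerate q.2.toList).flatMap (aTerm ox t q.1))
        = bFlat ps ox oy t := by
  intro ps
  induction ps with
  | nil =>
    intro oy
    unfold bFlat
    rw [PySem.List.enumerate_nil, List.flatMap_nil]
    symm
    rw [List.flatMap_eq_nil_iff]
    intro y _
    unfold bBlock
    rw [if_neg]
    rintro ⟨hA, hB⟩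
    simp at hB
    omega
  | cons r rs ih =>
    intro oy
    rw [PySem.List.enumerate_cons, List.flatMap_cons]
    unfold bFlat
    have hpt : ∀ y, bBlock (r :: rs) ox oy t y =
        (if y = oy then bInner ox t r.toList y else []) ++ bBlock rs ox (oy + 1) t y := by
      intro y
      by_cases hy : y = oy
      · subst hy
        have hg : bBlock rs ox (y + 1) t y = [] := by
          unfold bBlock; rw [if_neg]; rintro ⟨hA, _⟩; omega
        rw [hg, List.append_nil, if_pos rfl]
        unfold bBlock
        have h0 : y - y = (0 : Int) := by omega
        rw [h0, PySem.List.pyGetD_zero_cons, if_pos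
          ⟨le_refl 0, by exact_mod_cast Nat.succ_pos rs.length⟩]
      · rw [if_neg hy, List.nil_append]
        unfold bBlock
        by_cases hlt : y < oy
        · rw [if_neg (by rintro ⟨hA, _⟩; omega), if_neg (by rintro ⟨hA, _⟩; omega)]
        · have h1 : 1 ≤ y - oy := by omega
          rw [pyGetD_cons_pos r rs _ _ h1]
          have harg : y - oy - 1 = y - (oy + 1) := by omega
          rw [harg]
          have hlen : ((r :: rs).length : Int) = (rs.length : Int) + 1 := by simp
          by_cases hb : 0 ≤ y - (oy + 1) ∧ y - (oy + 1) < (rs.length : Int)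
          · rw [if_pos ⟨by omega, by rw [hlen]; omega⟩, if_pos hb]
          · rw [if_neg (by rw [hlen]; rintro ⟨hA, hB⟩; exact hb ⟨by omega, by omega⟩), if_neg hb]
    calc (PySem.List.enumerate r.toList).flatMap (aTerm ox t oy)
          ++ (PySem.List.enumerate rs (oy + 1)).flatMap
              (fun q => (PySem.List.enumerate q.2.toList).flatMap (aTerm ox t q.1))
        = (if oy ∈ PySem.List.pyRange 0 7 then bInner ox t r.toList oy else [])
            ++ (PySem.List.pyRange 0 7).flatMap (bBlock rs ox (oy + 1) t) := by
          congr 1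
          · by_cases hy : 0 ≤ oy ∧ oy < 7
            · rw [if_pos ((PySem.List.mem_pyRange_one).mpr hy)]
              have h := aInner_eq t r.toList 0 ox oy hy.1 hy.2
              have h2 : ox + 0 = ox := by ring
              rw [h2] at h
              exact h
            · rw [if_neg (fun hmem => hy ((PySem.List.mem_pyRange_one).mp hmem))]
              exact aInner_nil_of t r.toList 0 ox oy hy
          · exact ih (oy + 1)
      _ = (PySem.List.pyRange 0 7).flatMap (bBlock (r :: rs) ox oy t) := by
          rw [List.flatMap_congr (fun y _ => hpt y)]
          rw [flatMap_split _ _ oy _ (PySem.List.pairwise_lt_pyRange_one 0 7)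
            (fun x hx => by rw [if_neg hx])
            (fun x hx => by
              unfold bBlock
              rw [if_neg]; rintro ⟨hA, _⟩; omega)]
          simp

-- enumerate with shifted start
lemma flatMap_enumerate_shift {α γ : Type} (h2 : Int → α → List γ) :
    ∀ (l : List α) (s oy : Int),
      (PySem.List.enumerate l s).flatMap (fun q => h2 (oy + q.1) q.2)
        = (PySem.List.enumerate l (oy + s)).flatMap (fun q => h2 q.1 q.2) := by
  intro l
  induction l with
  | nil => intro s oy; simp [PySem.List.enumerate_nil]
  | cons x l ih =>
    intro s oy
    rw [PySem.List.enumerate_cons, PySem.List.enumerate_cons, List.flatMap_cons, List.flatMap_cons]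
    congr 1
    rw [ih (s + 1) oy]
    ring_nf

-- the two ports, written as Set.ofList of the flat forms
lemma stamp_eq_flat (pattern : List String) (ox oy : Int) (t : String) :
    stamp pattern ox oy t = (bFlat pattern ox oy t).foldl PySem.Set.add [] := by
  unfold stamp
  have hinner : ∀ (cells : List (Int × Int)) (q : Int × String),
      (PySem.List.enumerate q.2.toList).foldl (fun cells dxch =>
        if String.mk [dxch.2] ≠ t then cells
        else
          let x := ox + dxch.1
          let y := oy + q.1
          if 0 ≤ x ∧ x < 53 ∧ 0 ≤ y ∧ y < 7 then PySem.Set.add cells (x, y) else cells)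
        cells
      = ((PySem.List.enumerate q.2.toList).flatMap (aTerm ox t (oy + q.1))).foldl
          PySem.Set.add cells := by
    intro cells q
    rw [← foldl_add_blocks]
    apply PySem.List.foldl_congr_mem
    intro acc p _
    dsimp only
    unfold aTerm
    by_cases hc : String.mk [p.2] = t
    · rw [if_neg (by simpa using hc)]
      by_cases hb : 0 ≤ ox + p.1 ∧ ox + p.1 < 53 ∧ 0 ≤ oy + q.1 ∧ oy + q.1 < 7
      · rw [if_pos hb, if_pos ⟨hc, ⟨hb.1, hb.2.1⟩, hb.2.2⟩]
        rfl
      · rw [if_neg hb, if_neg (by tauto)]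
        rfl
    · rw [if_pos (by simpa using hc)]
      rw [if_neg (by tauto)]
      rfl
  calc (PySem.List.enumerate pattern).foldl _ PySem.Set.empty
      = (PySem.List.enumerate pattern).foldl (fun cells q =>
          ((PySem.List.enumerate q.2.toList).flatMap (aTerm ox t (oy + q.1))).foldl
            PySem.Set.add cells) PySem.Set.empty := by
        exact PySem.List.foldl_congr_mem _ _ _ _ (fun acc q _ => hinner acc q)
    _ = ((PySem.List.enumerate pattern).flatMap (fun q =>
          (PySem.List.enumerate q.2.toList).flatMap (aTerm ox t (oy + q.1)))).foldl
            PySem.Set.add [] := by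
        rw [foldl_add_blocks]; rfl
    _ = _ := by
        rw [flatMap_enumerate_shift
          (fun y cs => (PySem.List.enumerate cs.toList).flatMap (aTerm ox t y)) pattern 0 oy]
        have h0 : oy + 0 = oy := by ring
        rw [h0, outer_eq t ox pattern oy]

lemma stamp_alt_eq_flat (pattern : List String) (ox oy : Int) (t : String) :
    stamp_alt pattern ox oy t = (bFlat pattern ox oy t).foldl PySem.Set.add [] := by
  unfold stamp_alt
  have hinner : ∀ (cells : List (Int × Int)) (y : Int) (row : List Char),
      (PySem.List.pyRange 0 53).foldl (fun cells x =>
        let dx := x - ox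
        if (0 ≤ dx ∧ dx < (row.length : Int)) ∧ String.mk [PySem.List.pyGetD row dx ' '] = t
        then PySem.Set.add cells (x, y) else cells) cells
      = (bInner ox t row y).foldl PySem.Set.add cells := by
    intro cells y row
    unfold bInner
    rw [← foldl_add_blocks]
    apply PySem.List.foldl_congr_mem
    intro acc x _
    dsimp only
    unfold bTerm
    split <;> rfl
  calc (PySem.List.pyRange 0 7).foldl _ PySem.Set.empty
      = (PySem.List.pyRange 0 7).foldl (fun cells y =>
          (bBlock pattern ox oy t y).foldl PySem.Set.add cells) PySem.Set.empty := by
        apply PySem.List.foldl_congr_mem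
        intro acc y _
        dsimp only
        unfold bBlock
        split
        · exact hinner acc y _
        · rfl
    _ = _ := by
        rw [foldl_add_blocks]
        rfl

-- ===== VERDICT (by name: the statement is the Claim_ definition above) =====
theorem stamp_spec : Claim_equal_stamp := by
  intro pattern ox oy t _
  unfold Spec_stamp
  rw [stamp_eq_flat, stamp_alt_eq_flat]
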